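-- pv_equiv track=rewrite | github.com/pypi-data/pypi-mirror-96 | packages/bfgsupport/bfgsupport-0.0.7-py3-none-any.whl/bfgsupport/source/player.py | _active_bid_history
-- ===== SOURCE A (Python) =====
-- def _active_bid_history(bid_history):
--     """Return the bid history without leading PASSES."""
--     temp_history = []
--     started = False
--     for bid in bid_history:
--         if bid != 'P' or started:
--             temp_history.append(bid)
--             started = True
--     return temp_history
-- ===== SOURCE B (Python) =====
-- def _active_bid_history(bid_history):
--     """Return the bid history without leading PASSES."""
--     for i, bid in enumerate(bid_history):
--         if bid != 'P':
--             return list(bid_history[i:])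
--     return []
-- ===== Notes on version B (the rewrite author's own statement) =====
-- stated objective: simpler
-- what changed: Replaces the flag-driven per-element append loop with find-first-non-'P'-then-slice: scan for the boundary index and return the remaining suffix.
import Mathlib
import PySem

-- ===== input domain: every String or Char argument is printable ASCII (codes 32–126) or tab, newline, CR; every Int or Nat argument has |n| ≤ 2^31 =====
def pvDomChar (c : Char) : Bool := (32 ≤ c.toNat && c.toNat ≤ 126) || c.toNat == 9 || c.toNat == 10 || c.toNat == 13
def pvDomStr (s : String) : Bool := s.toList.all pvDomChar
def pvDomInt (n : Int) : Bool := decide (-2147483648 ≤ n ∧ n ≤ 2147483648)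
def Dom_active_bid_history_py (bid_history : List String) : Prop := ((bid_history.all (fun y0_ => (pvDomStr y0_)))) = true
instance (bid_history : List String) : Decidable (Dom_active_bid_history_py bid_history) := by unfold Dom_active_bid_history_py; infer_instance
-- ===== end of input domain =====

-- B replaces A's flag-driven append loop by find-first-non-'P' then return the suffix (objective: simpler).

-- ===== PORT A =====
-- literal port of A: fold over the bids carrying (temp_history, started)
def active_bid_history_py (bid_history : List String) : List String :=
  (bid_history.foldl
    (fun (st : List String × Bool) bid =>
      if bid ≠ "P" ∨ st.2 then (st.1 ++ [bid], true) else st)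
    ([], false)).1

-- ===== PORT B =====
-- literal port of B: scan for the first bid ≠ "P"; return the suffix from there, else []
def active_bid_history_py_alt (bid_history : List String) : List String :=
  match bid_history with
  | [] => []
  | bid :: rest => if bid ≠ "P" then bid :: rest else active_bid_history_py_alt rest

-- ===== PRECONDITION & SPEC =====
def Spec_active_bid_history_py (bid_history : List String) (out : List String) : Prop := out = active_bid_history_py_alt bid_history
instance (bid_history : List String) (out : List String) : Decidable (Spec_active_bid_history_py bid_history out) := by unfold Spec_active_bid_history_py; infer_instance

-- ===== CLAIM (what is proved, stated in full; the proofs are below) =====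
def Claim_equal_active_bid_history_py : Prop := ∀ (bid_history : List String), Dom_active_bid_history_py bid_history → Spec_active_bid_history_py bid_history (active_bid_history_py bid_history)

-- ===== LEMMAS AND PROOFS =====

-- once started = true, A's loop appends every remaining bid
theorem pv_fold_started (l : List String) (acc : List String) :
    (l.foldl
      (fun (st : List String × Bool) bid =>
        if bid ≠ "P" ∨ st.2 then (st.1 ++ [bid], true) else st)
      (acc, true)).1 = acc ++ l := by
  induction l generalizing acc with
  | nil => simp
  | cons b t ih => simp [List.foldl, ih]

-- while started = false, A's fold computes acc ++ B's suffix
theorem pv_fold_unstarted (l : List String) :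
    (l.foldl
      (fun (st : List String × Bool) bid =>
        if bid ≠ "P" ∨ st.2 then (st.1 ++ [bid], true) else st)
      ([], false)).1 = active_bid_history_py_alt l := by
  induction l with
  | nil => simp [active_bid_history_py_alt]
  | cons b t ih =>
    by_cases hb : b = "P"
    · simp [List.foldl, hb, active_bid_history_py_alt, ih]
    · simp [List.foldl, hb, active_bid_history_py_alt, pv_fold_started]

-- ===== VERDICT (by name: the statement is the Claim_ definition above) =====
theorem active_bid_history_py_spec : Claim_equal_active_bid_history_py := by
  intro bh _
  unfold Spec_active_bid_history_py active_bid_history_py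
  exact pv_fold_unstarted bh
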